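-- pv_equiv track=rewrite | github.com/meetkeeps15/wp-agent | wizard_designer/tools/NameSelectorFusionTool.py | _extract_brand_voice_from_visual_style
-- ===== SOURCE A (Python) =====
-- from typing import Optional, Dict, List, Any
--
-- def _extract_brand_voice_from_visual_style(visual_style: Dict[str, Any]) -> str:
--     """
--     Extract brand voice from GPT visual style analysis.
--     """
--     styling_vibe = visual_style.get("styling_vibe_tags", [])
--     if isinstance(styling_vibe, list):
--         vibe_text = " ".join(styling_vibe).lower()
--
--         if any(word in vibe_text for word in ["luxury", "premium", "exclusive", "high-end"]):
--             return "luxury"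
--         elif any(word in vibe_text for word in ["casual", "relaxed", "comfortable", "everyday"]):
--             return "casual"
--         elif any(word in vibe_text for word in ["sophisticated", "elegant", "refined", "classy"]):
--             return "sophisticated"
--         elif any(word in vibe_text for word in ["edgy", "bold", "daring", "rebellious"]):
--             return "edgy"
--         elif any(word in vibe_text for word in ["professional", "business", "corporate", "formal"]):
--             return "professional"
--         elif any(word in vibe_text for word in ["trendy", "fashion-forward", "stylish", "modern"]):
--             return "trendy"
--
--     return "professional"  # Default
-- ===== SOURCE B (Python) =====
-- # Text-driven scan: one pass over the positions of the joined lowercased text,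
-- # keeping the minimal priority rank of any keyword starting at each position
-- # (naive multi-pattern matching), instead of per-keyword substring tests in a cascade.
-- _LABELS = ["luxury", "casual", "sophisticated", "edgy", "professional", "trendy"]
-- _KEYWORDS = [
--     ("luxury", 0), ("premium", 0), ("exclusive", 0), ("high-end", 0),
--     ("casual", 1), ("relaxed", 1), ("comfortable", 1), ("everyday", 1),
--     ("sophisticated", 2), ("elegant", 2), ("refined", 2), ("classy", 2),
--     ("edgy", 3), ("bold", 3), ("daring", 3), ("rebellious", 3),
--     ("professional", 4), ("business", 4), ("corporate", 4), ("formal", 4),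
--     ("trendy", 5), ("fashion-forward", 5), ("stylish", 5), ("modern", 5),
-- ]
--
-- def _extract_brand_voice_from_visual_style(visual_style):
--     styling_vibe = visual_style.get("styling_vibe_tags", [])
--     if not isinstance(styling_vibe, list):
--         return "professional"
--     text = " ".join(styling_vibe).lower()
--     best = 6
--     for i in range(len(text)):
--         for kw, rank in _KEYWORDS:
--             if rank < best and text.startswith(kw, i):
--                 best = rank
--     return _LABELS[best] if best < 6 else "professional"
-- ===== Notes on version B (the rewrite author's own statement) =====
-- stated objective: alternative
-- what changed: Replaced the keyword-driven if/elif cascade of substring tests by a single text-driven scan: one pass over the positions of the joined lowercased text keeping the minimal priority rank of any keyword starting there (naive multi-pattern matching), then mapping the best rank to its label.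
import Mathlib
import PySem

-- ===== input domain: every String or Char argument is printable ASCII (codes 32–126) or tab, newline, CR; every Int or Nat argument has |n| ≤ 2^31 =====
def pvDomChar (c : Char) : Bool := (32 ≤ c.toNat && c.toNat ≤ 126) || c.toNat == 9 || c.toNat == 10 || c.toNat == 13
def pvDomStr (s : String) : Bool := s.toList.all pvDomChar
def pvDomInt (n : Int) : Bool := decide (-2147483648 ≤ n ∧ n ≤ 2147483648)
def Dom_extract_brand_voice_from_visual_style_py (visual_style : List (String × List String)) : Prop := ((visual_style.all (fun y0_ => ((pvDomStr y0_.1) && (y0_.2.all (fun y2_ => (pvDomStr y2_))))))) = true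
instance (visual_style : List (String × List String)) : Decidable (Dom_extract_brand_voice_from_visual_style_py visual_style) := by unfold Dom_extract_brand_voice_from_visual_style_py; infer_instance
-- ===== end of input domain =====

-- One honest line: B replaces A's keyword-driven if/elif cascade of substring tests by a
-- single text-driven position scan keeping the minimal matched priority rank (alternative).

-- ===== PORT A =====
-- visual_style.get("styling_vibe_tags", []) on the association list (first match; shared by both ports)
def aGetVibe (visual_style : List (String × List String)) : List String :=
  match visual_style.find? (fun p => p.1 == "styling_vibe_tags") with
  | some p => p.2
  | none => []

def extract_brand_voice_from_visual_style_py (visual_style : List (String × List String)) : String :=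
  let styling_vibe := aGetVibe visual_style
  -- isinstance(styling_vibe, list) is always true under the typed domain (value is a list)
  let vibe_text := PySem.Str.lower (PySem.Str.join " " styling_vibe)
  if (["luxury", "premium", "exclusive", "high-end"].any (fun w => PySem.Str.isIn w vibe_text)) then "luxury"
  else if (["casual", "relaxed", "comfortable", "everyday"].any (fun w => PySem.Str.isIn w vibe_text)) then "casual"
  else if (["sophisticated", "elegant", "refined", "classy"].any (fun w => PySem.Str.isIn w vibe_text)) then "sophisticated"
  else if (["edgy", "bold", "daring", "rebellious"].any (fun w => PySem.Str.isIn w vibe_text)) then "edgy"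
  else if (["professional", "business", "corporate", "formal"].any (fun w => PySem.Str.isIn w vibe_text)) then "professional"
  else if (["trendy", "fashion-forward", "stylish", "modern"].any (fun w => PySem.Str.isIn w vibe_text)) then "trendy"
  else "professional"

-- ===== PORT B =====
def voiceLabels : List String :=
  ["luxury", "casual", "sophisticated", "edgy", "professional", "trendy"]

def kwTable : List (String × Nat) :=
  [("luxury", 0), ("premium", 0), ("exclusive", 0), ("high-end", 0),
   ("casual", 1), ("relaxed", 1), ("comfortable", 1), ("everyday", 1),
   ("sophisticated", 2), ("elegant", 2), ("refined", 2), ("classy", 2),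
   ("edgy", 3), ("bold", 3), ("daring", 3), ("rebellious", 3),
   ("professional", 4), ("business", 4), ("corporate", 4), ("formal", 4),
   ("trendy", 5), ("fashion-forward", 5), ("stylish", 5), ("modern", 5)]

-- the double loop of Source B: for i in range(len(text)): for kw, rank in _KEYWORDS: …
-- text.startswith(kw, i) with 0 ≤ i is exactly PySem.Chars.startswith (t.drop i) kw.toList
def bestRank (t : List Char) : Nat :=
  (List.range t.length).foldl
    (fun best i => kwTable.foldl
      (fun b p => if p.2 < b && PySem.Chars.startswith (t.drop i) p.1.toList then p.2 else b)
      best)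
    6

def extract_brand_voice_from_visual_style_py_alt (visual_style : List (String × List String)) : String :=
  let t := (PySem.Str.lower (PySem.Str.join " " (aGetVibe visual_style))).toList
  let best := bestRank t
  -- _LABELS[best]: the guard best < 6 makes the index in range, so getD is exact
  if best < 6 then voiceLabels.getD best "professional" else "professional"

-- ===== PRECONDITION & SPEC =====
def Spec_extract_brand_voice_from_visual_style_py (visual_style : List (String × List String)) (out : String) : Prop := out = extract_brand_voice_from_visual_style_py_alt visual_style
instance (visual_style : List (String × List String)) (out : String) : Decidable (Spec_extract_brand_voice_from_visual_style_py visual_style out) := by unfold Spec_extract_brand_voice_from_visual_style_py; infer_instance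

-- ===== CLAIM =====
def Claim_equal_extract_brand_voice_from_visual_style_py : Prop := ∀ (visual_style : List (String × List String)), Dom_extract_brand_voice_from_visual_style_py visual_style → Spec_extract_brand_voice_from_visual_style_py visual_style (extract_brand_voice_from_visual_style_py visual_style)

-- ===== LEMMAS AND PROOFS =====

set_option maxRecDepth 8192
set_option maxHeartbeats 1000000

-- generic min-fold lemmas (inner loop shape)
theorem innerFold_le_init (t : List Char) (i : Nat) (L : List (String × Nat)) (b : Nat) :
    L.foldl (fun b p => if p.2 < b && PySem.Chars.startswith (t.drop i) p.1.toList then p.2 else b) b ≤ b := by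
  induction L generalizing b with
  | nil => exact le_rfl
  | cons a L ih =>
    refine le_trans (ih _) ?_
    dsimp only
    split <;> rename_i h
    · simp only [Bool.and_eq_true, decide_eq_true_eq] at h; omega
    · exact le_rfl

theorem innerFold_le_mem (t : List Char) (i : Nat) (L : List (String × Nat)) (b : Nat)
    (p : String × Nat) (hp : p ∈ L)
    (hc : PySem.Chars.startswith (t.drop i) p.1.toList = true) :
    L.foldl (fun b p => if p.2 < b && PySem.Chars.startswith (t.drop i) p.1.toList then p.2 else b) b ≤ p.2 := by
  induction hp generalizing b with
  | head L =>
    refine le_trans (innerFold_le_init t i L _) ?_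
    dsimp only
    split <;> rename_i hif
    · exact le_rfl
    · simp only [hc, Bool.and_true, decide_eq_true_eq] at hif; omega
  | tail a _ ih => exact ih _

theorem innerFold_cases (t : List Char) (i : Nat) (L : List (String × Nat)) (b : Nat) :
    L.foldl (fun b p => if p.2 < b && PySem.Chars.startswith (t.drop i) p.1.toList then p.2 else b) b = b
    ∨ ∃ p ∈ L, PySem.Chars.startswith (t.drop i) p.1.toList = true
        ∧ L.foldl (fun b p => if p.2 < b && PySem.Chars.startswith (t.drop i) p.1.toList then p.2 else b) b = p.2 := by
  induction L generalizing b with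
  | nil => left; rfl
  | cons a L ih =>
    dsimp only [List.foldl]
    rcases ih (if a.2 < b && PySem.Chars.startswith (t.drop i) a.1.toList then a.2 else b) with h | ⟨p, hp, hc, he⟩
    · rw [h]
      split <;> rename_i hif
      · right
        refine ⟨a, List.mem_cons_self, ?_, rfl⟩
        simp only [Bool.and_eq_true, decide_eq_true_eq] at hif
        exact hif.2
      · left; rfl
    · right; exact ⟨p, List.mem_cons_of_mem _ hp, hc, he⟩

-- outer loop lemmas
theorem outerFold_le_init (t : List Char) (K : List (String × Nat)) (L : List Nat) (b : Nat) :
    L.foldl (fun best i => K.foldl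
      (fun b p => if p.2 < b && PySem.Chars.startswith (t.drop i) p.1.toList then p.2 else b) best) b ≤ b := by
  induction L generalizing b with
  | nil => exact le_rfl
  | cons a L ih => exact le_trans (ih _) (innerFold_le_init t a K _)

theorem outerFold_le_mem (t : List Char) (K : List (String × Nat)) (L : List Nat) (b : Nat) (i : Nat) (hi : i ∈ L)
    (p : String × Nat) (hp : p ∈ K)
    (hc : PySem.Chars.startswith (t.drop i) p.1.toList = true) :
    L.foldl (fun best i => K.foldl
      (fun b p => if p.2 < b && PySem.Chars.startswith (t.drop i) p.1.toList then p.2 else b) best) b ≤ p.2 := by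
  induction hi generalizing b with
  | head L => exact le_trans (outerFold_le_init t K L _) (innerFold_le_mem t i K b p hp hc)
  | tail a _ ih => exact ih _

theorem outerFold_cases (t : List Char) (K : List (String × Nat)) (L : List Nat) (b : Nat) :
    L.foldl (fun best i => K.foldl
      (fun b p => if p.2 < b && PySem.Chars.startswith (t.drop i) p.1.toList then p.2 else b) best) b = b
    ∨ ∃ p ∈ K, PySem.Chars.isIn p.1.toList t = true
        ∧ L.foldl (fun best i => K.foldl
            (fun b p => if p.2 < b && PySem.Chars.startswith (t.drop i) p.1.toList then p.2 else b) best) b = p.2 := by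
  induction L generalizing b with
  | nil => left; rfl
  | cons a L ih =>
    dsimp only [List.foldl]
    rcases ih (K.foldl (fun b p => if p.2 < b && PySem.Chars.startswith (t.drop a) p.1.toList then p.2 else b) b)
      with h | ⟨p, hp, hc, he⟩
    · rw [h]
      rcases innerFold_cases t a K b with h2 | ⟨p, hp, hc, he⟩
      · left; exact h2
      · right
        refine ⟨p, hp, ?_, he⟩
        exact (PySem.Chars.exists_prefix_drop_iff_isIn _ _).mp
          ⟨a, (PySem.Chars.startswith_iff _ _).mp hc⟩
    · right; exact ⟨p, hp, hc, he⟩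

-- a matching (nonempty) keyword yields a position i < t.length where it starts
theorem bestRank_le_of_isIn (t : List Char) (p : String × Nat) (hp : p ∈ kwTable)
    (hne : p.1.toList ≠ []) (hin : PySem.Chars.isIn p.1.toList t = true) :
    bestRank t ≤ p.2 := by
  obtain ⟨j, hj⟩ := (PySem.Chars.exists_prefix_drop_iff_isIn _ _).mpr hin
  have hjlt : j < t.length := by
    by_contra h
    have hnil : t.drop j = [] := List.drop_eq_nil_of_le (by omega)
    rw [hnil] at hj
    exact hne (List.prefix_nil.mp hj)
  exact outerFold_le_mem t kwTable (List.range t.length) 6 j (List.mem_range.mpr hjlt) p hp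
    ((PySem.Chars.startswith_iff _ _).mpr hj)

theorem bestRank_cases (t : List Char) :
    bestRank t = 6 ∨ ∃ p ∈ kwTable, PySem.Chars.isIn p.1.toList t = true ∧ bestRank t = p.2 :=
  outerFold_cases t kwTable (List.range t.length) 6

theorem bestRank_eq (t : List Char) (r : Nat) (hr : r < 6) (hup : bestRank t ≤ r)
    (hlow : ∀ p ∈ kwTable, p.2 < r → PySem.Chars.isIn p.1.toList t = false) :
    bestRank t = r := by
  rcases bestRank_cases t with hc | ⟨p, hp, hpin, hpe⟩
  · omega
  · by_cases h : p.2 < r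
    · rw [hlow p hp h] at hpin; cases hpin
    · -- fin_cases would also do; p.2 ≥ r and bestRank = p.2 ≤ r
      omega

theorem bestRank_eq_six (t : List Char)
    (hall : ∀ p ∈ kwTable, PySem.Chars.isIn p.1.toList t = false) :
    bestRank t = 6 := by
  rcases bestRank_cases t with hc | ⟨p, hp, hpin, _⟩
  · exact hc
  · rw [hall p hp] at hpin; cases hpin

-- the cascade over group tests equals the label of the minimal matched rank
theorem cascade_eq_best (t : List Char) :
    (if (["luxury", "premium", "exclusive", "high-end"].any (fun w => PySem.Chars.isIn w.toList t)) then "luxury"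
     else if (["casual", "relaxed", "comfortable", "everyday"].any (fun w => PySem.Chars.isIn w.toList t)) then "casual"
     else if (["sophisticated", "elegant", "refined", "classy"].any (fun w => PySem.Chars.isIn w.toList t)) then "sophisticated"
     else if (["edgy", "bold", "daring", "rebellious"].any (fun w => PySem.Chars.isIn w.toList t)) then "edgy"
     else if (["professional", "business", "corporate", "formal"].any (fun w => PySem.Chars.isIn w.toList t)) then "professional"
     else if (["trendy", "fashion-forward", "stylish", "modern"].any (fun w => PySem.Chars.isIn w.toList t)) then "trendy"
     else "professional")
    = (if bestRank t < 6 then voiceLabels.getD (bestRank t) "professional" else "professional") := by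
  by_cases h1 : (["luxury", "premium", "exclusive", "high-end"].any (fun w => PySem.Chars.isIn w.toList t)) = true
  · have hup : bestRank t ≤ 0 := by
      simp only [List.any_cons, List.any_nil, Bool.or_eq_true, Bool.or_false] at h1
      rcases h1 with h | h | h | h
      · exact bestRank_le_of_isIn t ("luxury", 0) (by decide) (by decide) h
      · exact bestRank_le_of_isIn t ("premium", 0) (by decide) (by decide) h
      · exact bestRank_le_of_isIn t ("exclusive", 0) (by decide) (by decide) h
      · exact bestRank_le_of_isIn t ("high-end", 0) (by decide) (by decide) h
    have heq : bestRank t = 0 := bestRank_eq t 0 (by omega) hup (fun p hp hlt => absurd hlt (by omega))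
    simp [h1, heq, voiceLabels]
  by_cases h2 : (["casual", "relaxed", "comfortable", "everyday"].any (fun w => PySem.Chars.isIn w.toList t)) = true
  · have hup : bestRank t ≤ 1 := by
      simp only [List.any_cons, List.any_nil, Bool.or_eq_true, Bool.or_false] at h2
      rcases h2 with h | h | h | h
      · exact bestRank_le_of_isIn t ("casual", 1) (by decide) (by decide) h
      · exact bestRank_le_of_isIn t ("relaxed", 1) (by decide) (by decide) h
      · exact bestRank_le_of_isIn t ("comfortable", 1) (by decide) (by decide) h
      · exact bestRank_le_of_isIn t ("everyday", 1) (by decide) (by decide) h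
    have heq : bestRank t = 1 := by
      refine bestRank_eq t 1 (by omega) hup ?_
      intro p hp hlt
      simp only [Bool.not_eq_true, List.any_cons, List.any_nil, Bool.or_false,
        Bool.or_eq_false_iff] at h1
      fin_cases hp <;> first | omega | simp_all
    simp [h2, heq, h1, voiceLabels]
  by_cases h3 : (["sophisticated", "elegant", "refined", "classy"].any (fun w => PySem.Chars.isIn w.toList t)) = true
  · have hup : bestRank t ≤ 2 := by
      simp only [List.any_cons, List.any_nil, Bool.or_eq_true, Bool.or_false] at h3
      rcases h3 with h | h | h | h
      · exact bestRank_le_of_isIn t ("sophisticated", 2) (by decide) (by decide) h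
      · exact bestRank_le_of_isIn t ("elegant", 2) (by decide) (by decide) h
      · exact bestRank_le_of_isIn t ("refined", 2) (by decide) (by decide) h
      · exact bestRank_le_of_isIn t ("classy", 2) (by decide) (by decide) h
    have heq : bestRank t = 2 := by
      refine bestRank_eq t 2 (by omega) hup ?_
      intro p hp hlt
      simp only [Bool.not_eq_true, List.any_cons, List.any_nil, Bool.or_false,
        Bool.or_eq_false_iff] at h1 h2
      fin_cases hp <;> first | omega | simp_all
    simp [h3, heq, h1, h2, voiceLabels]
  by_cases h4 : (["edgy", "bold", "daring", "rebellious"].any (fun w => PySem.Chars.isIn w.toList t)) = true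
  · have hup : bestRank t ≤ 3 := by
      simp only [List.any_cons, List.any_nil, Bool.or_eq_true, Bool.or_false] at h4
      rcases h4 with h | h | h | h
      · exact bestRank_le_of_isIn t ("edgy", 3) (by decide) (by decide) h
      · exact bestRank_le_of_isIn t ("bold", 3) (by decide) (by decide) h
      · exact bestRank_le_of_isIn t ("daring", 3) (by decide) (by decide) h
      · exact bestRank_le_of_isIn t ("rebellious", 3) (by decide) (by decide) h
    have heq : bestRank t = 3 := by
      refine bestRank_eq t 3 (by omega) hup ?_
      intro p hp hlt
      simp only [Bool.not_eq_true, List.any_cons, List.any_nil, Bool.or_false,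
        Bool.or_eq_false_iff] at h1 h2 h3
      fin_cases hp <;> first | omega | simp_all
    simp [h4, heq, h1, h2, h3, voiceLabels]
  by_cases h5 : (["professional", "business", "corporate", "formal"].any (fun w => PySem.Chars.isIn w.toList t)) = true
  · have hup : bestRank t ≤ 4 := by
      simp only [List.any_cons, List.any_nil, Bool.or_eq_true, Bool.or_false] at h5
      rcases h5 with h | h | h | h
      · exact bestRank_le_of_isIn t ("professional", 4) (by decide) (by decide) h
      · exact bestRank_le_of_isIn t ("business", 4) (by decide) (by decide) h
      · exact bestRank_le_of_isIn t ("corporate", 4) (by decide) (by decide) h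
      · exact bestRank_le_of_isIn t ("formal", 4) (by decide) (by decide) h
    have heq : bestRank t = 4 := by
      refine bestRank_eq t 4 (by omega) hup ?_
      intro p hp hlt
      simp only [Bool.not_eq_true, List.any_cons, List.any_nil, Bool.or_false,
        Bool.or_eq_false_iff] at h1 h2 h3 h4
      fin_cases hp <;> first | omega | simp_all
    simp [h5, heq, h1, h2, h3, h4, voiceLabels]
  by_cases h6 : (["trendy", "fashion-forward", "stylish", "modern"].any (fun w => PySem.Chars.isIn w.toList t)) = true
  · have hup : bestRank t ≤ 5 := by
      simp only [List.any_cons, List.any_nil, Bool.or_eq_true, Bool.or_false] at h6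
      rcases h6 with h | h | h | h
      · exact bestRank_le_of_isIn t ("trendy", 5) (by decide) (by decide) h
      · exact bestRank_le_of_isIn t ("fashion-forward", 5) (by decide) (by decide) h
      · exact bestRank_le_of_isIn t ("stylish", 5) (by decide) (by decide) h
      · exact bestRank_le_of_isIn t ("modern", 5) (by decide) (by decide) h
    have heq : bestRank t = 5 := by
      refine bestRank_eq t 5 (by omega) hup ?_
      intro p hp hlt
      simp only [Bool.not_eq_true, List.any_cons, List.any_nil, Bool.or_false,
        Bool.or_eq_false_iff] at h1 h2 h3 h4 h5
      fin_cases hp <;> first | omega | simp_all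
    simp [h6, heq, h1, h2, h3, h4, h5, voiceLabels]
  have heq : bestRank t = 6 := by
    refine bestRank_eq_six t ?_
    intro p hp
    simp only [Bool.not_eq_true, List.any_cons, List.any_nil, Bool.or_false,
      Bool.or_eq_false_iff] at h1 h2 h3 h4 h5 h6
    fin_cases hp <;> simp_all
  simp only [Bool.not_eq_true, List.any_cons, List.any_nil, Bool.or_false,
    Bool.or_eq_false_iff] at h1 h2 h3 h4 h5 h6
  simp_all

-- ===== VERDICT =====
theorem extract_brand_voice_from_visual_style_py_spec : Claim_equal_extract_brand_voice_from_visual_style_py := by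
  intro vs _
  unfold Spec_extract_brand_voice_from_visual_style_py
  show extract_brand_voice_from_visual_style_py vs = extract_brand_voice_from_visual_style_py_alt vs
  simp only [extract_brand_voice_from_visual_style_py, extract_brand_voice_from_visual_style_py_alt,
    PySem.Str.isIn_eq]
  exact cascade_eq_best _
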